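-- pv_equiv track=rewrite | github.com/bencyq/hase | inference/predict_model_latency.py | _parse_nchw
-- ===== SOURCE A (Python) =====
-- from typing import Dict, List, Optional, Tuple
--
-- def _parse_nchw(shape: List[int]) -> Tuple[int, int, int, int]:
--     vals = [int(x) for x in shape]
--     if len(vals) >= 4:
--         return vals[0], vals[1], vals[2], vals[3]
--     if len(vals) == 3:
--         return vals[0], vals[1], vals[2], 1
--     if len(vals) == 2:
--         return vals[0], vals[1], 1, 1
--     if len(vals) == 1:
--         return vals[0], 1, 1, 1
--     return 1, 1, 1, 1
-- ===== SOURCE B (Python) =====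
-- from typing import List, Tuple
--
-- def _parse_nchw(shape: List[int]) -> Tuple[int, int, int, int]:
--     # Start from the default (1, 1, 1, 1) and overwrite the first four slots
--     # in a single pass over the input; elements beyond index 3 are still
--     # int-converted (preserving A's exception behaviour) but ignored.
--     out = [1, 1, 1, 1]
--     for i, x in enumerate(shape):
--         v = int(x)
--         if i < 4:
--             out[i] = v
--     return tuple(out)
-- ===== Notes on version B (the rewrite author's own statement) =====
-- stated objective: alternative
-- what changed: Replaces A's descending length-case ladder of early returns with a single enumerated pass that overwrites an accumulator of four default ones in place, so no length inspection or case analysis remains.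
import Mathlib
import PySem

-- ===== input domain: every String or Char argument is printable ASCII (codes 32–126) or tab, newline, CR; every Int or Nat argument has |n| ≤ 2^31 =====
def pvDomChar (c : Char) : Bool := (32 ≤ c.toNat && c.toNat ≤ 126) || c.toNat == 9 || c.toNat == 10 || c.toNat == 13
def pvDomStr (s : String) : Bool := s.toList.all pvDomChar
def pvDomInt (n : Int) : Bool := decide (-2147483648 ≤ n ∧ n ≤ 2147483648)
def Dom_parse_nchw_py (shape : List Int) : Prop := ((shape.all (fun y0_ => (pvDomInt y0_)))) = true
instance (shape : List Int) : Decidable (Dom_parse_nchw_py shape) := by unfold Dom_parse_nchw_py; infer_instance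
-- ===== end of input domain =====

-- B replaces A's descending length-case ladder with one enumerated pass that
-- overwrites a default [1,1,1,1] accumulator (alternative decomposition).

-- ===== PORT A =====
-- A: vals = [int(x) for x in shape] (identity on ints), then a ladder of length cases.
def parse_nchw_py (shape : List Int) : Int × Int × Int × Int :=
  let vals := shape.map (fun x => x)
  if vals.length ≥ 4 then (vals.getD 0 0, vals.getD 1 0, vals.getD 2 0, vals.getD 3 0)
  else if vals.length = 3 then (vals.getD 0 0, vals.getD 1 0, vals.getD 2 0, 1)
  else if vals.length = 2 then (vals.getD 0 0, vals.getD 1 0, 1, 1)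
  else if vals.length = 1 then (vals.getD 0 0, 1, 1, 1)
  else (1, 1, 1, 1)

-- ===== PORT B =====
-- B: out = [1,1,1,1]; for i, x in enumerate(shape): if i < 4: out[i] = int(x); tuple(out).
-- out[i] = v for 0 ≤ i < 4 is List.set i.toNat (exact: enumerate indices are nonnegative).
def parse_nchw_py_alt (shape : List Int) : Int × Int × Int × Int :=
  let out : List Int := [1, 1, 1, 1]
  let out := (PySem.List.enumerate shape).foldl
    (fun out (p : Int × Int) => if p.1 < 4 then out.set p.1.toNat p.2 else out) out
  (out.getD 0 0, out.getD 1 0, out.getD 2 0, out.getD 3 0)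

-- ===== PRECONDITION & SPEC =====
def Spec_parse_nchw_py (shape : List Int) (out : Int × Int × Int × Int) : Prop := out = parse_nchw_py_alt shape
instance (shape : List Int) (out : Int × Int × Int × Int) : Decidable (Spec_parse_nchw_py shape out) := by unfold Spec_parse_nchw_py; infer_instance

-- ===== CLAIM =====
def Claim_equal_parse_nchw_py : Prop := ∀ (shape : List Int), Dom_parse_nchw_py shape → Spec_parse_nchw_py shape (parse_nchw_py shape)

-- ===== LEMMAS AND PROOFS =====
-- Once the enumeration index reaches 4, every remaining step is a no-op.
theorem pv_fold_tail_id (xs : List Int) (s : Int) (out : List Int) (hs : 4 ≤ s) :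
    (PySem.List.enumerate xs s).foldl
      (fun out (p : Int × Int) => if p.1 < 4 then out.set p.1.toNat p.2 else out) out = out := by
  induction xs generalizing s out with
  | nil => simp [PySem.List.enumerate_nil]
  | cons x xs ih =>
      rw [PySem.List.enumerate_cons]
      simp only [List.foldl_cons]
      rw [if_neg (by omega)]
      exact ih (s + 1) out (by omega)

-- ===== VERDICT =====
theorem parse_nchw_py_spec : Claim_equal_parse_nchw_py := by
  intro shape _
  unfold Spec_parse_nchw_py parse_nchw_py parse_nchw_py_alt
  rcases shape with _ | ⟨a, _ | ⟨b, _ | ⟨c, _ | ⟨d, t⟩⟩⟩⟩ <;>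
    simp [PySem.List.enumerate_cons, List.getD, pv_fold_tail_id]
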